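-- pv_equiv track=rewrite | github.com/dmlc/gluon-nlp | scripts/classification/classification_utils.py | get_proj
-- ===== SOURCE A (Python) =====
-- def get_proj(label):
--     label_proj = {}
--     label_names = []
--     for i in range(len(label)):
--         if label[i] not in label_names:
--             label_names.append(label[i])
--     label_names.sort()
--     for i in range(len(label_names)):
--         label_proj[label_names[i]] = i
--     return label_proj
-- ===== SOURCE B (Python) =====
-- def get_proj(label):
--     label_proj = {}
--     idx = 0
--     for x in sorted(label):
--         if x not in label_proj:
--             label_proj[x] = idx
--             idx += 1
--     return label_proj
-- ===== Notes on version B (the rewrite author's own statement) =====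
-- stated objective: faster
-- what changed: Replaces A's quadratic dedup-by-list-scan followed by sort-and-enumerate with a single sort of the full list and one linear pass that assigns a running rank to each first occurrence via dict membership.
import Mathlib
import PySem

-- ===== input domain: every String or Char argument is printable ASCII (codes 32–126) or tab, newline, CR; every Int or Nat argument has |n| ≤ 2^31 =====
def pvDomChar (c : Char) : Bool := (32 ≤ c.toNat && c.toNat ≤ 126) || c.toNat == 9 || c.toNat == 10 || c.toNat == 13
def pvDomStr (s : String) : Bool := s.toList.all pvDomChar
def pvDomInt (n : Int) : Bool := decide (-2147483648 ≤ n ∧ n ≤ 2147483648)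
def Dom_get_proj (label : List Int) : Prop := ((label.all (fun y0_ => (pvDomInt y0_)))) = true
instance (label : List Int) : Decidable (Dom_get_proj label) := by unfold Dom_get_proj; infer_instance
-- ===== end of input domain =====

-- B replaces A's quadratic dedup-by-membership-scan followed by sort-and-enumerate with one sort
-- of the full list and a single pass carrying a running rank counter (objective: faster).

-- ===== PORT A =====
-- for i in range(len(label)): if label[i] not in label_names: label_names.append(label[i])
def pvDedupLoopA (label : List Int) : List Int :=
  (PySem.List.pyRange 0 (PySem.List.len label) 1).foldl
    (fun ns i =>
      if (PySem.List.pyGetD label i 0) ∈ ns then ns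
      else ns ++ [PySem.List.pyGetD label i 0]) []

-- for i in range(len(label_names)): label_proj[label_names[i]] = i
def pvFillLoopA (ns : List Int) : PySem.Dict Int Int :=
  (PySem.List.pyRange 0 (PySem.List.len ns) 1).foldl
    (fun d i => d.insert (PySem.List.pyGetD ns i 0) i) PySem.Dict.empty

def get_proj (label : List Int) : List (Int × Int) :=
  (pvFillLoopA (PySem.List.sorted (pvDedupLoopA label) (fun x => x) false)).items

-- ===== PORT B =====
-- label_proj = {}; idx = 0
-- for x in sorted(label): if x not in label_proj: label_proj[x] = idx; idx += 1
def get_proj_alt (label : List Int) : List (Int × Int) :=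
  (((PySem.List.sorted label (fun x => x) false).foldl
      (fun (acc : PySem.Dict Int Int × Int) x =>
        if acc.1.contains x then acc else (acc.1.insert x acc.2, acc.2 + 1))
      (PySem.Dict.empty, 0)).1).items

-- ===== PRECONDITION & SPEC =====
def Spec_get_proj (label : List Int) (out : List (Int × Int)) : Prop := out = get_proj_alt label
instance (label : List Int) (out : List (Int × Int)) : Decidable (Spec_get_proj label out) := by unfold Spec_get_proj; infer_instance

-- ===== CLAIM (what is proved, stated in full; the proofs are below) =====
def Claim_equal_get_proj : Prop := ∀ (label : List Int), Dom_get_proj label → Spec_get_proj label (get_proj label)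

-- ===== LEMMAS AND PROOFS =====

-- first occurrences in xs of values not in `seen`
def pvDistinct : List Int → List Int → List Int
  | _, [] => []
  | seen, x :: t => if x ∈ seen then pvDistinct seen t else x :: pvDistinct (x :: seen) t

-- pair each element with its position, starting at i
def pvRank : List Int → Int → List (Int × Int)
  | [], _ => []
  | x :: t, i => (x, i) :: pvRank t (i + 1)

theorem pvDistinct_congr (t : List Int) : ∀ (s1 s2 : List Int),
    (∀ a : Int, a ∈ s1 ↔ a ∈ s2) → pvDistinct s1 t = pvDistinct s2 t := by
  induction t with
  | nil => intro _ _ _; rfl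
  | cons x t ih =>
    intro s1 s2 h
    simp only [pvDistinct]
    by_cases hx : x ∈ s2
    · rw [if_pos ((h x).mpr hx), if_pos hx, ih s1 s2 h]
    · rw [if_neg (fun c => hx ((h x).mp c)), if_neg hx,
        ih (x :: s1) (x :: s2) (by intro a; simp [List.mem_cons, h a])]

theorem foldl_add_eq_pvDistinct (xs : List Int) : ∀ (s : List Int),
    xs.foldl (fun ns x => if x ∈ ns then ns else ns ++ [x]) s = s ++ pvDistinct s xs := by
  induction xs with
  | nil => intro s; simp [pvDistinct]
  | cons x t ih =>
    intro s
    simp only [List.foldl_cons, pvDistinct]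
    by_cases hx : x ∈ s
    · rw [if_pos hx, if_pos hx, ih s]
    · rw [if_neg hx, if_neg hx, ih (s ++ [x]),
        pvDistinct_congr t (s ++ [x]) (x :: s) (by intro a; simp [List.mem_cons, or_comm])]
      simp

theorem mem_pvDistinct (xs : List Int) : ∀ (s : List Int) (y : Int),
    y ∈ pvDistinct s xs ↔ y ∈ xs ∧ y ∉ s := by
  induction xs with
  | nil => intro s y; simp [pvDistinct]
  | cons x t ih =>
    intro s y
    simp only [pvDistinct]
    by_cases hx : x ∈ s
    · rw [if_pos hx, ih]
      by_cases hyx : y = x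
      · subst hyx
        simp [hx]
      · simp [hyx]
    · rw [if_neg hx]
      simp only [List.mem_cons, ih, List.mem_cons]
      by_cases hyx : y = x
      · subst hyx
        simp [hx]
      · simp only [hyx, false_or]

theorem sublist_pvDistinct (xs : List Int) : ∀ (s : List Int), (pvDistinct s xs).Sublist xs := by
  induction xs with
  | nil => intro s; simp [pvDistinct]
  | cons x t ih =>
    intro s
    simp only [pvDistinct]
    by_cases hx : x ∈ s
    · exact (if_pos hx ▸ (ih s).cons x)
    · exact (if_neg hx ▸ (ih (x :: s)).cons₂ x)

theorem nodup_pvDistinct (xs : List Int) : ∀ (s : List Int), (pvDistinct s xs).Nodup := by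
  induction xs with
  | nil => intro s; simp [pvDistinct]
  | cons x t ih =>
    intro s
    simp only [pvDistinct]
    by_cases hx : x ∈ s
    · rw [if_pos hx]; exact ih s
    · rw [if_neg hx]
      refine List.nodup_cons.mpr ⟨?_, ih (x :: s)⟩
      intro hmem
      exact ((mem_pvDistinct t (x :: s) x).mp hmem).2 List.mem_cons_self

-- Dict facts for inserting a key the dict does not yet hold
theorem dict_items_insert_fresh (d : PySem.Dict Int Int) (k : Int) (v : Int)
    (h : d.contains k = false) : (d.insert k v).items = d.items ++ [(k, v)] := by
  simp [PySem.Dict.insert, h]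

theorem dict_contains_insert_fresh (d : PySem.Dict Int Int) (k : Int) (v : Int) (y : Int)
    (h : d.contains k = false) : (d.insert k v).contains y = (d.contains y || (k == y)) := by
  have h' : (d.items.any fun p => p.1 == k) = false := h
  simp [PySem.Dict.insert, PySem.Dict.contains, h']

-- A's second loop: inserting nodup fresh keys with consecutive values appends ranked pairs
theorem dictloop (ns : List Int) : ∀ (s : Int) (d : PySem.Dict Int Int),
    (∀ x ∈ ns, d.contains x = false) → ns.Nodup →
    ((List.range ns.length).foldl (fun d k => d.insert (ns.getD k 0) (s + (k : Int))) d).items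
      = d.items ++ pvRank ns s := by
  induction ns with
  | nil => intro s d _ _; simp [pvRank]
  | cons x t ih =>
    intro s d hf hnd
    rw [List.length_cons, List.range_succ_eq_map, List.foldl_cons, List.foldl_map]
    have h0 : d.insert ((x :: t).getD 0 0) (s + ((0 : Nat) : Int)) = d.insert x s := by
      simp
    rw [h0]
    have hbody : (fun (d : PySem.Dict Int Int) (k : Nat) =>
        d.insert ((x :: t).getD k.succ 0) (s + ((k.succ : Nat) : Int)))
        = (fun d k => d.insert (t.getD k 0) ((s + 1) + (k : Int))) := by
      funext d k
      rw [List.getD_cons_succ]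
      congr 1
      push_cast
      ring
    rw [hbody]
    have hx : d.contains x = false := hf x List.mem_cons_self
    have hfresh : ∀ y ∈ t, (d.insert x s).contains y = false := by
      intro y hy
      rw [dict_contains_insert_fresh d x s y hx]
      have h1 : d.contains y = false := hf y (List.mem_cons_of_mem _ hy)
      have h2 : x ≠ y := by
        rintro rfl
        exact (List.nodup_cons.mp hnd).1 hy
      simp [h1, h2]
    rw [ih (s + 1) (d.insert x s) hfresh (List.nodup_cons.mp hnd).2,
        dict_items_insert_fresh d x s hx]
    simp [pvRank]

-- B's loop: one pass inserting first occurrences with a running counter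
theorem bloop (xs : List Int) : ∀ (d : PySem.Dict Int Int) (i : Int) (s : List Int),
    (∀ x : Int, d.contains x = true ↔ x ∈ s) →
    ((xs.foldl
        (fun (acc : PySem.Dict Int Int × Int) x =>
          if acc.1.contains x then acc else (acc.1.insert x acc.2, acc.2 + 1))
        (d, i)).1).items
      = d.items ++ pvRank (pvDistinct s xs) i := by
  induction xs with
  | nil => intro d i s _; simp [pvDistinct, pvRank]
  | cons x t ih =>
    intro d i s hds
    simp only [List.foldl_cons, pvDistinct]
    by_cases hx : x ∈ s
    · rw [if_pos ((hds x).mpr hx), if_pos hx]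
      exact ih d i s hds
    · have hdx : d.contains x = false := by
        rw [Bool.eq_false_iff]
        intro c
        exact hx ((hds x).mp c)
      rw [if_neg (by simp [hdx]), if_neg hx]
      have hds' : ∀ y : Int, (d.insert x i).contains y = true ↔ y ∈ x :: s := by
        intro y
        rw [dict_contains_insert_fresh d x i y hdx, Bool.or_eq_true, beq_iff_eq,
          hds y, List.mem_cons]
        constructor
        · rintro (h | rfl)
          exacts [Or.inr h, Or.inl rfl]
        · rintro (rfl | h)
          exacts [Or.inr rfl, Or.inl h]
      rw [ih (d.insert x i) (i + 1) (x :: s) hds',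
          dict_items_insert_fresh d x i hdx]
      simp [pvRank]

-- the bridge: sorting the deduplicated list equals deduplicating the sorted list
theorem sorted_pvDistinct_comm (label : List Int) :
    PySem.List.sorted (pvDistinct [] label) (fun x => x) false
      = pvDistinct [] (PySem.List.sorted label (fun x => x) false) := by
  apply PySem.List.sorted_eq_of_perm_of_pairwise_lt
  · rw [List.perm_ext_iff_of_nodup (nodup_pvDistinct _ _) (nodup_pvDistinct _ _)]
    intro a
    simp [mem_pvDistinct, PySem.List.mem_sorted]
  · have hle : (pvDistinct [] (PySem.List.sorted label (fun x => x) false)).Pairwise (· ≤ ·) :=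
      List.Pairwise.sublist (sublist_pvDistinct _ _)
        (PySem.List.sorted_pairwise label (fun x => x))
    have hne : (pvDistinct [] (PySem.List.sorted label (fun x => x) false)).Pairwise (· ≠ ·) :=
      nodup_pvDistinct _ _
    exact (hle.and hne).imp (fun h => lt_of_le_of_ne h.1 h.2)

-- ===== VERDICT (by name: the statement is the Claim_ definition above) =====
theorem get_proj_spec : Claim_equal_get_proj := by
  intro label _
  unfold Spec_get_proj get_proj get_proj_alt pvFillLoopA pvDedupLoopA
  rw [PySem.List.foldl_pyRange_zero_pyGetD label 0
      (fun ns x => if x ∈ ns then ns else ns ++ [x]) []]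
  rw [foldl_add_eq_pvDistinct label [], List.nil_append]
  generalize hns : PySem.List.sorted (pvDistinct [] label) (fun x => x) false = ns
  rw [show PySem.List.len ns = ((ns.length : Nat) : Int) from rfl,
      PySem.List.pyRange_zero_nat ns.length, List.foldl_map]
  have hidx : (fun (d : PySem.Dict Int Int) (k : Nat) =>
      d.insert (PySem.List.pyGetD ns (k : Int) 0) (k : Int))
      = (fun d k => d.insert (ns.getD k 0) ((0 : Int) + (k : Int))) := by
    funext d k
    rw [PySem.List.pyGetD_natCast, zero_add]
  rw [hidx]
  have hnodup : ns.Nodup := by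
    rw [← hns]
    exact (PySem.List.sorted_perm (pvDistinct [] label) (fun x => x) false).nodup_iff.mpr
      (nodup_pvDistinct label [])
  rw [dictloop ns 0 PySem.Dict.empty (fun x _ => rfl) hnodup]
  rw [bloop (PySem.List.sorted label (fun x => x) false) PySem.Dict.empty 0 []
      (by intro x; simp [PySem.Dict.empty, PySem.Dict.contains])]
  rw [← hns, sorted_pvDistinct_comm]
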